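-- pv_equiv track=rewrite | github.com/klayza/Kyverno | OpenDirDL.py | URLtoPath
-- ===== SOURCE A (Python) =====
-- def URLtoPath(link):
--     count = 0
--     path = ""
--     for letter in link:
--         if count == 3:
--             path += letter
--         elif letter == "/":
--             count += 1
--     return path
-- ===== SOURCE B (Python) =====
-- def URLtoPath(link):
--     parts = link.split('/', 3)
--     if len(parts) < 4:
--         return ''
--     return parts[3]
-- ===== Notes on version B (the rewrite author's own statement) =====
-- stated objective: idiomatic
-- what changed: Replaces the character-by-character slash-counter loop with a single str.split('/', 3) and a length-guarded selection of the fourth part.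
import Mathlib
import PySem

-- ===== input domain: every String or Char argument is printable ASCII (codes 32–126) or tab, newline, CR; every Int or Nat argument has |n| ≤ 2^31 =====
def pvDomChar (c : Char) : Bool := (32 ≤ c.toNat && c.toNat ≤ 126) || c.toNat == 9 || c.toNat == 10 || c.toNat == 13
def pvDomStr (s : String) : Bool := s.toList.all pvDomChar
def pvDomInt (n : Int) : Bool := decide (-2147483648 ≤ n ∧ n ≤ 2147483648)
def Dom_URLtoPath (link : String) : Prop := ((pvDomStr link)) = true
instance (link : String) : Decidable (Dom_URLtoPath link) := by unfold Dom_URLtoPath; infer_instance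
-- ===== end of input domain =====

-- B replaces A's character-by-character slash-counter loop with split('/', 3) and a
-- length-guarded selection of the fourth part (idiomatic; same O(n) cost).

-- ===== PORT A =====
-- literal transliteration: count/path accumulator over the characters of link
def URLtoPath (link : String) : String :=
  let r := link.toList.foldl
    (fun (st : Int × List Char) letter =>
      if st.1 = 3 then (st.1, st.2 ++ [letter])
      else if letter = '/' then (st.1 + 1, st.2)
      else st)
    (0, [])
  String.ofList r.2

-- ===== PORT B =====
-- parts = link.split('/', 3); if len(parts) < 4: return ''; return parts[3]
def URLtoPath_alt (link : String) : String :=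
  match PySem.Str.splitMax? link "/" 3 with
  | none => ""            -- unreachable: the separator "/" is nonempty
  | some parts => if parts.length < 4 then "" else parts.getD 3 ""

-- ===== PRECONDITION & SPEC =====
def Spec_URLtoPath (link : String) (out : String) : Prop := out = URLtoPath_alt link
instance (link : String) (out : String) : Decidable (Spec_URLtoPath link out) := by unfold Spec_URLtoPath; infer_instance

-- ===== CLAIM (what is proved, stated in full; the proofs are below) =====
def Claim_equal_URLtoPath : Prop := ∀ (link : String), Dom_URLtoPath link → Spec_URLtoPath link (URLtoPath link)

-- ===== LEMMAS AND PROOFS =====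

-- the suffix of l after its k-th '/' ([] if fewer than k slashes)
def afterK : Nat → List Char → List Char
  | 0, l => l
  | _ + 1, [] => []
  | k + 1, c :: rest => if c = '/' then afterK k rest else afterK (k + 1) rest

-- reference split: at most m splits on '/'
def mySplit : Nat → List Char → List (List Char)
  | 0, l => [l]
  | _ + 1, [] => [[]]
  | m + 1, c :: rest =>
    if c = '/' then [] :: mySplit m rest
    else match mySplit (m + 1) rest with
      | [] => [[c]]
      | x :: xs => (c :: x) :: xs

def consPre (cur : List Char) : List (List Char) → List (List Char)
  | [] => [cur]
  | x :: xs => (cur ++ x) :: xs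

theorem mySplit_ne_nil (m : Nat) (l : List Char) : mySplit m l ≠ [] := by
  cases m with
  | zero => simp [mySplit]
  | succ m =>
    cases l with
    | nil => simp [mySplit]
    | cons c rest =>
      simp only [mySplit]
      split_ifs
      · simp
      · split <;> simp

theorem go_eq (l : List Char) : ∀ (fuel m : Nat) (cur : List Char) (acc : List (List Char)),
    l.length < fuel →
    PySem.Chars.splitOnMax.go ['/'] fuel m l cur acc
      = acc.reverse ++ consPre cur.reverse (mySplit m l) := by
  induction l with
  | nil =>
    intro fuel m cur acc h
    cases fuel with
    | zero => omega
    | succ fuel =>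
      cases m <;> simp [PySem.Chars.splitOnMax.go, mySplit, consPre]
  | cons c rest ih =>
    intro fuel m cur acc h
    cases fuel with
    | zero => simp at h
    | succ fuel =>
      cases m with
      | zero =>
        simp [PySem.Chars.splitOnMax.go, mySplit, consPre]
      | succ m =>
        by_cases hc : c = '/'
        · subst hc
          rw [show PySem.Chars.splitOnMax.go ['/'] (fuel + 1) (m + 1) ('/' :: rest) cur acc
              = PySem.Chars.splitOnMax.go ['/'] fuel m rest [] (cur.reverse :: acc) by
              simp [PySem.Chars.splitOnMax.go, List.isPrefixOf]]
          rw [ih fuel m [] (cur.reverse :: acc) (by simpa using h)]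
          have hne := mySplit_ne_nil m rest
          cases hP : mySplit m rest with
          | nil => exact absurd hP hne
          | cons x xs => simp [mySplit, consPre, hP]
        · rw [show PySem.Chars.splitOnMax.go ['/'] (fuel + 1) (m + 1) (c :: rest) cur acc
              = PySem.Chars.splitOnMax.go ['/'] fuel (m + 1) rest (c :: cur) acc by
              simp [PySem.Chars.splitOnMax.go, List.isPrefixOf]
              intro h; exact absurd h.symm hc]
          rw [ih fuel (m + 1) (c :: cur) acc (by simpa using h)]
          have hne := mySplit_ne_nil (m + 1) rest
          cases hP : mySplit (m + 1) rest with
          | nil => exact absurd hP hne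
          | cons x xs => simp [mySplit, hc, hP, consPre]

theorem splitOnMax_eq (l : List Char) :
    PySem.Chars.splitOnMax l ['/'] 3 = mySplit 3 l := by
  rw [PySem.Chars.splitOnMax]
  simp only [show ¬((3 : Int) < 0) by norm_num, if_false]
  rw [go_eq l (l.length + 1) _ [] [] (by omega)]
  have hne := mySplit_ne_nil ((3 : Int).toNat) l
  cases hP : mySplit ((3 : Int).toNat) l with
  | nil => exact absurd hP hne
  | cons x xs =>
    have : ((3 : Int).toNat) = 3 := rfl
    rw [this] at hP
    simp [consPre, hP]

-- structural facts about mySplit m l versus afterK m l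
theorem mySplit_spec (l : List Char) : ∀ m : Nat,
    (mySplit m l).length ≤ m + 1 ∧
    ((mySplit m l).length = m + 1 → (mySplit m l).getD m [] = afterK m l) ∧
    ((mySplit m l).length < m + 1 → afterK m l = []) := by
  induction l with
  | nil =>
    intro m
    cases m with
    | zero => simp [mySplit, afterK]
    | succ m => simp [mySplit, afterK]
  | cons c rest ih =>
    intro m
    cases m with
    | zero => simp [mySplit, afterK]
    | succ m =>
      by_cases hc : c = '/'
      · subst hc
        obtain ⟨h1, h2, h3⟩ := ih m
        refine ⟨?_, ?_, ?_⟩ <;> simp [mySplit, afterK]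
        · omega
        · intro hlen; exact h2 (by omega)
        · intro hlen; exact h3 (by omega)
      · obtain ⟨h1, h2, h3⟩ := ih (m + 1)
        have hne := mySplit_ne_nil (m + 1) rest
        cases hP : mySplit (m + 1) rest with
        | nil => exact absurd hP hne
        | cons x xs =>
          rw [hP] at h1 h2 h3
          refine ⟨?_, ?_, ?_⟩ <;> simp [mySplit, hc, hP, afterK] at *
          · omega
          · intro hlen
            have := h2 (by omega)
            simpa [List.getD, List.getElem?_cons] using this
          · intro hlen; exact h3 (by omega)

-- A's fold computes path ++ afterK k, where k = 3 - count slashes remain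
theorem foldA_eq (l : List Char) : ∀ (k : Nat) (path : List Char), k ≤ 3 →
    (l.foldl
      (fun (st : Int × List Char) letter =>
        if st.1 = 3 then (st.1, st.2 ++ [letter])
        else if letter = '/' then (st.1 + 1, st.2)
        else st)
      ((3 - (k : Int)), path)).2 = path ++ afterK k l := by
  induction l with
  | nil => intro k path _; cases k <;> simp [afterK]
  | cons c rest ih =>
    intro k path hk
    cases k with
    | zero =>
      simp only [List.foldl_cons, if_pos (show (3 - ((0:Nat) : Int)) = 3 by norm_num)]
      have := ih 0 (path ++ [c]) (by omega)
      simpa [afterK] using this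
    | succ k =>
      have hne : (3 - ((k : Int) + 1)) ≠ 3 := by omega
      by_cases hc : c = '/'
      · subst hc
        simp only [List.foldl_cons]
        have heq : (3 - ((k + 1 : Nat) : Int)) + 1 = 3 - (k : Int) := by push_cast; omega
        rw [heq]
        have := ih k path (by omega)
        simpa [afterK] using this
      · simp only [List.foldl_cons]
        have := ih (k + 1) path (by omega)
        simpa [afterK, hc] using this

theorem URLtoPath_eq_afterK (link : String) :
    URLtoPath link = String.ofList (afterK 3 link.toList) := by
  unfold URLtoPath
  have := foldA_eq link.toList 3 [] (by omega)
  norm_num at this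
  simp [this]

-- ===== VERDICT (by name: the statement is the Claim_ definition above) =====
theorem URLtoPath_spec : Claim_equal_URLtoPath := by
  intro link _
  unfold Spec_URLtoPath URLtoPath_alt
  rw [URLtoPath_eq_afterK]
  have hsplit : PySem.Str.splitMax? link "/" 3
      = some ((mySplit 3 link.toList).map String.ofList) := by
    rw [PySem.Str.splitMax?]
    have : PySem.Chars.splitMax? link.toList "/".toList 3
        = some (mySplit 3 link.toList) := by
      rw [PySem.Chars.splitMax?]
      simp [show "/".toList = ['/'] from rfl, splitOnMax_eq]
    rw [this]; rfl
  rw [hsplit]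
  obtain ⟨h1, h2, h3⟩ := mySplit_spec link.toList 3
  simp only [List.length_map]
  by_cases hlen : (mySplit 3 link.toList).length < 4
  · rw [if_pos hlen]
    have := h3 (by omega)
    rw [this]
  · rw [if_neg hlen]
    have hlen4 : (mySplit 3 link.toList).length = 4 := by omega
    have := h2 (by omega)
    have hget : ((mySplit 3 link.toList).map String.ofList).getD 3 ""
        = String.ofList ((mySplit 3 link.toList).getD 3 []) := by
      have h3lt : 3 < (mySplit 3 link.toList).length := by omega
      simp [List.getD, List.getElem?_map, List.getElem?_eq_getElem h3lt]
    rw [hget, this]
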